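-- pv_equiv track=rewrite | github.com/Illhm/Spotdl | spotify_dl_v3.py | choose_media
-- ===== SOURCE A (Python) =====
-- def choose_media(data: dict):
--     medias = data.get("medias") or []
--     if not isinstance(medias, list) or not medias:
--         return None
--     # prefer mp3
--     for m in medias:
--         if isinstance(m, dict) and isinstance(m.get("url"), str) and ".mp3" in m["url"].lower():
--             return m
--     # fallback first with url
--     for m in medias:
--         if isinstance(m, dict) and isinstance(m.get("url"), str) and m["url"]:
--             return m
--     return None
-- ===== SOURCE B (Python) =====
-- def choose_media(data: dict):
--     medias = data.get("medias") or []
--     if not isinstance(medias, list):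
--         return None
--     cands = []
--     for m in medias:
--         if isinstance(m, dict) and isinstance(m.get("url"), str):
--             if ".mp3" in m["url"].lower():
--                 cands.append((0, m))
--             elif m["url"]:
--                 cands.append((1, m))
--     best = min(cands, key=lambda t: t[0], default=None)
--     return best[1] if best is not None else None
-- ===== Notes on version B (the rewrite author's own statement) =====
-- stated objective: alternative
-- what changed: Replaces A's two early-return scans (mp3 pass, then plain-url pass) with building a prioritized candidate list (0 = mp3 match, 1 = plain non-empty url) in one pass and selecting the first minimum-priority candidate with min(..., key, default=None).
import Mathlib
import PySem

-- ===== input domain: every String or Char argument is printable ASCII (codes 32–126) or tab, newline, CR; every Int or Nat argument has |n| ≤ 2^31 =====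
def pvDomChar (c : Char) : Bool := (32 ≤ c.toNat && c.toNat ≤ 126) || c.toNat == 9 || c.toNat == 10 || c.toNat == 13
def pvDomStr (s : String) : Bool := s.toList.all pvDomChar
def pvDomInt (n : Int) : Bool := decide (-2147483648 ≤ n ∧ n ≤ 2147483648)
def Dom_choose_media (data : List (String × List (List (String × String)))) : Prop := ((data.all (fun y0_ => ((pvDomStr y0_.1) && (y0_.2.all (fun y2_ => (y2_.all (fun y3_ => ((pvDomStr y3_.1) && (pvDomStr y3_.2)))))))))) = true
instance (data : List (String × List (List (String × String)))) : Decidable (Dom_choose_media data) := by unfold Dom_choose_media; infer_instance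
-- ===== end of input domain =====

-- B replaces A's two early-return scans with a prioritized candidate list (0 = mp3, 1 = plain url) selected by min-by-priority; return value unchanged (objective: alternative).

-- ===== PORT A =====
-- first loop of A: return first m whose "url" lowercased contains ".mp3"
def cmLoopMp3 (medias : List (List (String × String))) : Option (List (String × String)) :=
  match medias with
  | [] => none
  | m :: rest =>
    match (PySem.Dict.mk m).get? "url" with
    | some u => if PySem.Str.isIn ".mp3" (PySem.Str.lower u) then some m else cmLoopMp3 rest
    | none => cmLoopMp3 rest

-- second loop of A: return first m with a non-empty "url"
def cmLoopUrl (medias : List (List (String × String))) : Option (List (String × String)) :=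
  match medias with
  | [] => none
  | m :: rest =>
    match (PySem.Dict.mk m).get? "url" with
    | some u => if u ≠ "" then some m else cmLoopUrl rest
    | none => cmLoopUrl rest

def choose_media (data : List (String × List (List (String × String)))) : Option (List (String × String)) :=
  let medias := ((PySem.Dict.mk data).get? "medias").getD []
  if medias = [] then none
  else
    match cmLoopMp3 medias with
    | some m => some m
    | none => cmLoopUrl medias

-- ===== PORT B =====
-- B builds a prioritized candidate list in one pass (0 = mp3 match, 1 = plain non-empty url) …
def cmCands (medias : List (List (String × String))) : List (Int × List (String × String)) :=
  medias.filterMap (fun m =>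
    match (PySem.Dict.mk m).get? "url" with
    | some u =>
      if PySem.Str.isIn ".mp3" (PySem.Str.lower u) then some ((0 : Int), m)
      else if u ≠ "" then some ((1 : Int), m)
      else none
    | none => none)

-- … and selects the first minimum-priority candidate (Python min keeps the first minimal element)
def choose_media_alt (data : List (String × List (List (String × String)))) : Option (List (String × String)) :=
  let medias := ((PySem.Dict.mk data).get? "medias").getD []
  match PySem.List.min? (cmCands medias) (fun t => t.1) with
  | some best => some best.2
  | none => none

-- ===== PRECONDITION & SPEC =====
def Spec_choose_media (data : List (String × List (List (String × String)))) (out : Option (List (String × String))) : Prop := out = choose_media_alt data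
instance (data : List (String × List (List (String × String)))) (out : Option (List (String × String))) : Decidable (Spec_choose_media data out) := by unfold Spec_choose_media; infer_instance

-- ===== CLAIM (what is proved, stated in full; the proofs are below) =====
def Claim_equal_choose_media : Prop := ∀ (data : List (String × List (List (String × String)))), Dom_choose_media data → Spec_choose_media data (choose_media data)

-- ===== LEMMAS AND PROOFS =====

-- the running-minimum step of PySem.List.min? specialized to B's candidates
def cmStep (acc : Option (Int × List (String × String))) (x : Int × List (String × String)) :
    Option (Int × List (String × String)) :=
  match acc with
  | none => some x
  | some m => if x.1 < m.1 then some x else some m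

-- unfold one step of B's candidate list, keeping the tail folded
theorem cmCands_cons (m : List (String × String)) (rest : List (List (String × String))) :
    cmCands (m :: rest) =
      match (PySem.Dict.mk m).get? "url" with
      | some u =>
        if PySem.Chars.isIn ['.', 'm', 'p', '3'] (PySem.Chars.lower u.toList) = true then
          ((0 : Int), m) :: cmCands rest
        else if u = "" then cmCands rest
        else ((1 : Int), m) :: cmCands rest
      | none => cmCands rest := by
  cases hu : (PySem.Dict.mk m).get? "url" with
  | none => simp [cmCands, List.filterMap_cons, hu]
  | some u =>
    by_cases hm : PySem.Chars.isIn ['.', 'm', 'p', '3'] (PySem.Chars.lower u.toList) = true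
    · simp [cmCands, hu, hm]
    · have h0 : PySem.Chars.isIn ['.', 'm', 'p', '3'] (PySem.Chars.lower ([] : List Char)) = false := by
        decide
      by_cases he : u = "" <;> simp [cmCands, hu, hm, he, h0]

theorem cmFold_some (medias : List (List (String × String))) (b : Int × List (String × String))
    (hb : b.1 = 0 ∨ b.1 = 1) :
    (cmCands medias).foldl cmStep (some b) =
      if b.1 = 0 then some b
      else match cmLoopMp3 medias with
           | some m => some ((0 : Int), m)
           | none => some b := by
  induction medias generalizing b with
  | nil => rcases hb with h | h <;> simp [cmCands, cmLoopMp3, h]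
  | cons m rest ih =>
    rw [cmCands_cons]
    cases hu : (PySem.Dict.mk m).get? "url" with
    | none => rw [cmLoopMp3, hu]; exact ih b hb
    | some u =>
      dsimp only
      have hm3 : cmLoopMp3 (m :: rest) =
          if PySem.Chars.isIn ['.', 'm', 'p', '3'] (PySem.Chars.lower u.toList) = true then some m
          else cmLoopMp3 rest := by
        rw [cmLoopMp3, hu]; by_cases hm : PySem.Chars.isIn ['.', 'm', 'p', '3'] (PySem.Chars.lower u.toList) = true <;> simp [hm]
      by_cases hm : PySem.Chars.isIn ['.', 'm', 'p', '3'] (PySem.Chars.lower u.toList) = true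
      · rw [if_pos hm, hm3, if_pos hm, List.foldl_cons]
        rcases hb with h | h
        · have hs : cmStep (some b) ((0 : Int), m) = some b := by simp [cmStep, h]
          rw [hs, ih b (Or.inl h), if_pos h, if_pos h]
        · have hs : cmStep (some b) ((0 : Int), m) = some ((0 : Int), m) := by simp [cmStep, h]
          rw [hs, ih ((0 : Int), m) (Or.inl rfl)]
          simp [h]
      · rw [if_neg hm, hm3, if_neg hm]
        by_cases he : u = ""
        · rw [if_pos he]; exact ih b hb
        · rw [if_neg he, List.foldl_cons]
          have hs : cmStep (some b) ((1 : Int), m) = some b := by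
            rcases hb with h | h <;> simp [cmStep, h]
          rw [hs]; exact ih b hb

theorem cmFold_none (medias : List (List (String × String))) :
    (cmCands medias).foldl cmStep none =
      match cmLoopMp3 medias with
      | some m => some ((0 : Int), m)
      | none => (cmLoopUrl medias).map (fun m => ((1 : Int), m)) := by
  induction medias with
  | nil => simp [cmCands, cmLoopMp3, cmLoopUrl]
  | cons m rest ih =>
    rw [cmCands_cons]
    cases hu : (PySem.Dict.mk m).get? "url" with
    | none => rw [cmLoopMp3, hu, cmLoopUrl, hu]; exact ih
    | some u =>
      dsimp only
      have hm3 : cmLoopMp3 (m :: rest) =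
          if PySem.Chars.isIn ['.', 'm', 'p', '3'] (PySem.Chars.lower u.toList) = true then some m
          else cmLoopMp3 rest := by
        rw [cmLoopMp3, hu]; by_cases hm : PySem.Chars.isIn ['.', 'm', 'p', '3'] (PySem.Chars.lower u.toList) = true <;> simp [hm]
      have hu3 : cmLoopUrl (m :: rest) = if u = "" then cmLoopUrl rest else some m := by
        rw [cmLoopUrl, hu]; by_cases he : u = "" <;> simp [he]
      by_cases hm : PySem.Chars.isIn ['.', 'm', 'p', '3'] (PySem.Chars.lower u.toList) = true
      · rw [if_pos hm, hm3, if_pos hm, List.foldl_cons]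
        have hs : cmStep none ((0 : Int), m) = some ((0 : Int), m) := by simp [cmStep]
        rw [hs, cmFold_some rest ((0 : Int), m) (Or.inl rfl)]
        simp
      · rw [if_neg hm, hm3, if_neg hm, hu3]
        by_cases he : u = ""
        · rw [if_pos he, if_pos he]; exact ih
        · rw [if_neg he, if_neg he, List.foldl_cons]
          have hs : cmStep none ((1 : Int), m) = some ((1 : Int), m) := by simp [cmStep]
          rw [hs, cmFold_some rest ((1 : Int), m) (Or.inr rfl)]
          cases hmp : cmLoopMp3 rest <;> simp

theorem min?_cands_eq (medias : List (List (String × String))) :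
    PySem.List.min? (cmCands medias) (fun t => t.1) =
      match cmLoopMp3 medias with
      | some m => some ((0 : Int), m)
      | none => (cmLoopUrl medias).map (fun m => ((1 : Int), m)) := by
  have h : PySem.List.min? (cmCands medias) (fun t : Int × List (String × String) => t.1) =
      (cmCands medias).foldl cmStep none := by
    unfold PySem.List.min?
    congr 1
    funext acc x
    cases acc <;> rfl
  rw [h, cmFold_none]

-- ===== VERDICT (by name: the statement is the Claim_ definition above) =====
theorem choose_media_spec : Claim_equal_choose_media := by
  intro data _
  unfold Spec_choose_media choose_media choose_media_alt
  show (if ((PySem.Dict.mk data).get? "medias").getD [] = [] then none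
        else match cmLoopMp3 (((PySem.Dict.mk data).get? "medias").getD []) with
             | some m => some m
             | none => cmLoopUrl (((PySem.Dict.mk data).get? "medias").getD [])) =
       (match PySem.List.min? (cmCands (((PySem.Dict.mk data).get? "medias").getD []))
              (fun t => t.1) with
        | some best => some best.2
        | none => none)
  rw [min?_cands_eq]
  generalize (((PySem.Dict.mk data).get? "medias").getD [] :
      List (List (String × String))) = medias
  by_cases h : medias = []
  · simp [h, cmLoopMp3, cmLoopUrl]
  · cases hm : cmLoopMp3 medias with
    | some m => simp [h]
    | none =>
      cases hu : cmLoopUrl medias with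
      | some m => simp [h]
      | none => simp [h]
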